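-- pv_equiv track=rewrite | github.com/yorevs/hspylib | modules/clitt/src/main/clitt/core/tui/minput/minput_utils.py | over_masked
-- ===== SOURCE A (Python) =====
-- MASK_SYMBOLS = ["#", "@", "%", "*"]
--
-- def over_masked(value: str, mask: str) -> str:
--     """
--     Return the value to be printed by a 'masked' input field. A placeholder value will be used for unfilled values.
--     :param value: the masked field current value.
--     :param mask: the masked field's mask.
--     """
--     if value:
--         over_masked_val = ""
--         for idx, element in enumerate(mask):
--             if element in MASK_SYMBOLS:
--                 over_masked_val += value[idx] if idx < len(value) else mask[idx]
--             else:
--                 over_masked_val += element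
--         return over_masked_val
--
--     return mask
-- ===== SOURCE B (Python) =====
-- MASK_SYMBOLS = ["#", "@", "%", "*"]
--
--
-- def over_masked(value: str, mask: str) -> str:
--     filled = [v if m in MASK_SYMBOLS else m for m, v in zip(mask, value)]
--     return "".join(filled) + mask[len(value):]
-- ===== Notes on version B (the rewrite author's own statement) =====
-- stated objective: simpler
-- what changed: Replaces the enumerate loop with its per-index bounds test and repeated string concatenation by a zip of mask and value for the filled prefix joined once, plus the raw mask tail slice, dropping the empty-value guard.
import Mathlib
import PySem

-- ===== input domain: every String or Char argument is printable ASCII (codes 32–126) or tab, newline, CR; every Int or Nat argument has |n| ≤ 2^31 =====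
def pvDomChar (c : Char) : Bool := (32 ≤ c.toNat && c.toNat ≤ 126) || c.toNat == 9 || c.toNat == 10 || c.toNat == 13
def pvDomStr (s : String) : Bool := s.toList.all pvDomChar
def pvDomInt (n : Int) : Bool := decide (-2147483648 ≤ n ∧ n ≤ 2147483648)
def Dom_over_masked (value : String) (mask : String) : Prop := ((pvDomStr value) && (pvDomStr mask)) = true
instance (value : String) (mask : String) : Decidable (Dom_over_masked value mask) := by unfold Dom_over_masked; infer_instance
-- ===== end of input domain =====

-- B builds the result as a zip-prefix plus the raw mask tail, dropping A's per-index branch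
-- on idx < len(value) and the empty-value guard (objective: simpler).

-- ===== PORT A =====
def MASK_SYMBOLS : List Char := ['#', '@', '%', '*']

def over_masked (value : String) (mask : String) : String :=
  if value.toList ≠ [] then
    String.ofList ((PySem.List.enumerate mask.toList 0).foldl
      (fun acc (p : Int × Char) =>
        if MASK_SYMBOLS.contains p.2 then
          -- value[idx] / mask[idx]: idx is always in range here, so the .getD default is never used
          acc ++ [(if p.1 < (value.toList.length : Int)
                    then PySem.List.pyGet? value.toList p.1
                    else PySem.List.pyGet? mask.toList p.1).getD ' ']
        else acc ++ [p.2]) [])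
  else mask

-- ===== PORT B =====
def over_masked_alt (value : String) (mask : String) : String :=
  String.ofList (List.zipWith (fun m v => if MASK_SYMBOLS.contains m then v else m)
      mask.toList value.toList
    ++ PySem.List.slice mask.toList (some (value.toList.length : Int)) none)

-- ===== PRECONDITION & SPEC =====
def Spec_over_masked (value : String) (mask : String) (out : String) : Prop := out = over_masked_alt value mask
instance (value : String) (mask : String) (out : String) : Decidable (Spec_over_masked value mask out) := by unfold Spec_over_masked; infer_instance

-- ===== CLAIM (what is proved, stated in full; the proofs are below) =====
def Claim_equal_over_masked : Prop := ∀ (value : String) (mask : String), Dom_over_masked value mask → Spec_over_masked value mask (over_masked value mask)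

-- ===== LEMMAS AND PROOFS =====

theorem foldl_snoc (f : Int × Char → Char) :
    ∀ (l : List (Int × Char)) (acc : List Char),
      l.foldl (fun a p => a ++ [f p]) acc = acc ++ l.map f := by
  intro l
  induction l with
  | nil => simp
  | cons p rest ih => intro acc; simp [ih]

theorem map_g_eq (ML VL : List Char) :
    ∀ (fuel i : Nat), ML.length - i ≤ fuel →
      (PySem.List.enumerate (ML.drop i) (i : Int)).map
        (fun p => if MASK_SYMBOLS.contains p.2 then
            (if p.1 < (VL.length : Int)
              then PySem.List.pyGet? VL p.1
              else PySem.List.pyGet? ML p.1).getD ' '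
          else p.2)
      = List.zipWith (fun m v => if MASK_SYMBOLS.contains m then v else m)
          (ML.drop i) (VL.drop i)
        ++ (ML.drop i).drop (VL.length - i) := by
  intro fuel
  induction fuel with
  | zero =>
      intro i hle
      have h : ML.length ≤ i := by omega
      simp [List.drop_eq_nil_of_le h]
  | succ n ih =>
      intro i hle
      by_cases hi : i < ML.length
      · have hdrop : ML.drop i = ML[i] :: ML.drop (i + 1) :=
          List.drop_eq_getElem_cons hi
        rw [hdrop, PySem.List.enumerate_cons, List.map_cons]
        have ihstep := ih (i + 1) (by omega)
        by_cases hv : i < VL.length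
        · have hvdrop : VL.drop i = VL[i] :: VL.drop (i + 1) :=
            List.drop_eq_getElem_cons hv
          rw [hvdrop, List.zipWith_cons_cons]
          have hd : (ML[i] :: ML.drop (i + 1)).drop (VL.length - i)
              = (ML.drop (i + 1)).drop (VL.length - (i + 1)) := by
            have : VL.length - i = (VL.length - (i + 1)) + 1 := by omega
            rw [this]; simp; omega
          rw [hd]
          rw [show ((i + 1 : Nat) : Int) = (i : Int) + 1 by push_cast; ring] at ihstep
          rw [List.cons_append]
          have hvi : ((i : Nat) : Int) < (VL.length : Int) := by exact_mod_cast hv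
          simp [hvi, List.getElem?_eq_getElem hv]
          simpa using ihstep
        · have hvdrop : VL.drop i = [] := List.drop_eq_nil_of_le (by omega)
          rw [hvdrop, List.zipWith_nil_right]
          have hd : VL.length - i = 0 := by omega
          rw [hd, List.nil_append, List.drop_zero]
          have hvdrop' : VL.drop (i + 1) = [] := List.drop_eq_nil_of_le (by omega)
          rw [hvdrop', List.zipWith_nil_right, List.nil_append] at ihstep
          have hd' : VL.length - (i + 1) = 0 := by omega
          rw [hd', List.drop_zero] at ihstep
          rw [show ((i + 1 : Nat) : Int) = (i : Int) + 1 by push_cast; ring] at ihstep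
          rw [ihstep]
          congr 1
          have hvi : ¬ ((i : Nat) : Int) < (VL.length : Int) := by exact_mod_cast hv
          simp [PySem.List.pyGet?_natCast, hvi, List.getElem?_eq_getElem hi]
      · have h : ML.drop i = [] := List.drop_eq_nil_of_le (by omega)
        simp [h, PySem.List.enumerate_nil]

theorem over_masked_eq (value mask : String) :
    over_masked value mask = over_masked_alt value mask := by
  unfold over_masked over_masked_alt
  rw [PySem.List.slice_from_natCast]
  by_cases hv : value.toList = []
  · simp [hv, String.ofList_toList]
  · rw [if_pos hv]
    have hbody :
        (fun (acc : List Char) (p : Int × Char) =>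
          if MASK_SYMBOLS.contains p.2 then
            acc ++ [(if p.1 < (value.toList.length : Int)
                      then PySem.List.pyGet? value.toList p.1
                      else PySem.List.pyGet? mask.toList p.1).getD ' ']
          else acc ++ [p.2])
        = (fun acc p => acc ++
            [if MASK_SYMBOLS.contains p.2 then
              (if p.1 < (value.toList.length : Int)
                then PySem.List.pyGet? value.toList p.1
                else PySem.List.pyGet? mask.toList p.1).getD ' '
            else p.2]) := by
      funext acc p; split <;> rfl
    rw [hbody, foldl_snoc, List.nil_append]
    have := map_g_eq mask.toList value.toList mask.toList.length 0 (by omega)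
    exact congrArg String.ofList (by simpa using this)

-- ===== VERDICT (by name: the statement is the Claim_ definition above) =====
theorem over_masked_spec : Claim_equal_over_masked := by
  intro value mask _
  unfold Spec_over_masked
  exact over_masked_eq value mask
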